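-- pv_equiv track=rewrite | github.com/mdmurphy822/Ed4All | Trainforge/process_course.py | _median_difficulty
-- ===== SOURCE A (Python) =====
-- from typing import Any, Dict, List, Optional, Set, Tuple
--
-- BLOOM_WEIGHT = {
--     "remember": 1, "understand": 2, "apply": 3,
--     "analyze": 4, "evaluate": 5, "create": 6,
-- }
--
-- def _median_difficulty(blooms: List[str]) -> str:
--     """Compute difficulty from median Bloom's weight of a week's objectives."""
--     weights = sorted(BLOOM_WEIGHT[b] for b in blooms if b in BLOOM_WEIGHT)
--     if not weights:
--         return "intermediate"
--     median = weights[len(weights) // 2]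
--     if median <= 2:
--         return "foundational"
--     if median <= 4:
--         return "intermediate"
--     return "advanced"
-- ===== SOURCE B (Python) =====
-- BLOOM_WEIGHT = {
--     "remember": 1, "understand": 2, "apply": 3,
--     "analyze": 4, "evaluate": 5, "create": 6,
-- }
--
-- def _median_difficulty(blooms):
--     """Difficulty from the median Bloom's weight, via a frequency table (no sort)."""
--     counts = [0] * 7
--     n = 0
--     for b in blooms:
--         w = BLOOM_WEIGHT.get(b)
--         if w is not None:
--             counts[w] += 1
--             n += 1
--     if n == 0:
--         return "intermediate"
--     half = n // 2
--     median = 6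
--     cum = 0
--     for w in range(1, 6):
--         cum += counts[w]
--         if cum > half:
--             median = w
--             break
--     if median <= 2:
--         return "foundational"
--     if median <= 4:
--         return "intermediate"
--     return "advanced"
-- ===== Notes on version B (the rewrite author's own statement) =====
-- stated objective: alternative
-- what changed: Replaces sort-then-index median selection by a single counting pass over the six Bloom weights plus a cumulative-frequency scan that picks the first weight whose running count exceeds n//2.
import Mathlib
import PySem

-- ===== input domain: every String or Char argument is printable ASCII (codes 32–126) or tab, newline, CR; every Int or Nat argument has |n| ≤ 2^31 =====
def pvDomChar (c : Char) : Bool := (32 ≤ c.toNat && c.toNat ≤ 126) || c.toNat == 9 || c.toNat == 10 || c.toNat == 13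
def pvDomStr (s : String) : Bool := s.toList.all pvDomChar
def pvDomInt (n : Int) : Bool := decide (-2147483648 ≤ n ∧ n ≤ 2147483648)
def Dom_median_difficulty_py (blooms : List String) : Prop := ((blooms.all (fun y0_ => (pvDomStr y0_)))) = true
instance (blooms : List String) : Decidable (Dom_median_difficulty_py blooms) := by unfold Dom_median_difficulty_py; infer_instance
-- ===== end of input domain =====

-- B replaces sort-then-index by a six-slot frequency table and a cumulative scan to the median (alternative decomposition).

-- BLOOM_WEIGHT lookup (shared module constant of both Pythons): b in BLOOM_WEIGHT / BLOOM_WEIGHT.get(b)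
def bloomWeight? (b : String) : Option Int :=
  if b = "remember" then some 1
  else if b = "understand" then some 2
  else if b = "apply" then some 3
  else if b = "analyze" then some 4
  else if b = "evaluate" then some 5
  else if b = "create" then some 6
  else none

-- ===== PORT A =====
def median_difficulty_py (blooms : List String) : String :=
  let weights := PySem.List.sorted (blooms.filterMap bloomWeight?) (fun x => x) false
  if weights = [] then "intermediate"
  else
    -- weights[len(weights)//2]: the index is always in range here, so getD is exact
    let median := weights.getD (weights.length / 2) 0
    if median ≤ 2 then "foundational"
    else if median ≤ 4 then "intermediate"
    else "advanced"

-- ===== PORT B =====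
-- one pass: counts[w] += 1, n += 1 for each recognised bloom
def bStep (st : List Int × Int) (b : String) : List Int × Int :=
  match bloomWeight? b with
  | some w => (st.1.set w.toNat (st.1.getD w.toNat 0 + 1), st.2 + 1)
  | none => st

-- for w in range(1,6): cum += counts[w]; if cum > half: median = w; break   (median initialised to 6)
def bPick (counts : List Int) (half : Int) : List Nat → Int → Int
  | [], _ => 6
  | w :: ws, cum =>
      let cum' := cum + counts.getD w 0
      if cum' > half then (w : Int) else bPick counts half ws cum'

def median_difficulty_py_alt (blooms : List String) : String :=
  let st := blooms.foldl bStep ([0,0,0,0,0,0,0], 0)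
  let n := st.2
  if n = 0 then "intermediate"
  else
    let half := PySem.Int.floordiv n 2
    let median := bPick st.1 half [1, 2, 3, 4, 5] 0
    if median ≤ 2 then "foundational"
    else if median ≤ 4 then "intermediate"
    else "advanced"

-- ===== PRECONDITION & SPEC =====
def Spec_median_difficulty_py (blooms : List String) (out : String) : Prop := out = median_difficulty_py_alt blooms
instance (blooms : List String) (out : String) : Decidable (Spec_median_difficulty_py blooms out) := by unfold Spec_median_difficulty_py; infer_instance

-- ===== CLAIM (what is proved, stated in full; the proofs are below) =====
def Claim_equal_median_difficulty_py : Prop := ∀ (blooms : List String), Dom_median_difficulty_py blooms → Spec_median_difficulty_py blooms (median_difficulty_py blooms)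

-- ===== LEMMAS AND PROOFS =====

lemma bloomWeight_range {b : String} {w : Int} (h : bloomWeight? b = some w) : 1 ≤ w ∧ w ≤ 6 := by
  unfold bloomWeight? at h
  split_ifs at h <;> simp_all <;> omega

lemma mem_ws_range {blooms : List String} {x : Int} (h : x ∈ blooms.filterMap bloomWeight?) :
    1 ≤ x ∧ x ≤ 6 := by
  rcases List.mem_filterMap.1 h with ⟨b, _, hb⟩
  exact bloomWeight_range hb

-- sorted-list indexing vs counting: s[k] ≤ w ↔ more than k elements are ≤ w
lemma sorted_getD_le_iff (s : List Int) (hs : s.Pairwise (· ≤ ·)) :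
    ∀ (k : Nat), k < s.length → ∀ (w : Int),
      (s.getD k 0 ≤ w ↔ k < s.countP (fun x => decide (x ≤ w))) := by
  induction s with
  | nil => intro k hk; simp at hk
  | cons a t ih =>
    rcases List.pairwise_cons.1 hs with ⟨ha, ht⟩
    intro k hk w
    cases k with
    | zero =>
      simp only [List.getD_cons_zero, List.countP_cons]
      constructor
      · intro h
        have hd : decide (a ≤ w) = true := by simpa using h
        simp [hd]
      · intro h
        by_contra hne
        have h0 : t.countP (fun x => decide (x ≤ w)) = 0 := by
          rw [List.countP_eq_zero]
          intro x hx
          simp only [decide_eq_true_eq]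
          exact fun hxw => hne (le_trans (ha x hx) hxw)
        rw [h0] at h
        simp [hne] at h
    | succ k =>
      have hk' : k < t.length := by simpa using hk
      have hmem : t.getD k 0 ∈ t := by
        rw [List.getD_eq_getElem?_getD, List.getElem?_eq_getElem hk']
        exact List.getElem_mem hk'
      simp only [List.getD_cons_succ, List.countP_cons]
      have ihk := ih ht k hk' w
      constructor
      · intro h
        have h1 := ihk.1 h
        have hd : decide (a ≤ w) = true := by
          simpa using le_trans (ha _ hmem) h
        simp [hd]
        omega
      · intro h
        apply ihk.2
        split_ifs at h <;> omega

-- counting step: |{x ≤ w}| = |{x ≤ w-1}| + count w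
lemma countP_le_step (ws : List Int) (w : Int) :
    ws.countP (fun x => decide (x ≤ w)) = ws.countP (fun x => decide (x ≤ w - 1)) + ws.count w := by
  induction ws with
  | nil => simp
  | cons a t ih =>
    simp only [List.countP_cons, List.count_cons, ih]
    split_ifs <;> simp_all <;> omega

lemma countP_le_zero {ws : List Int} (h : ∀ x ∈ ws, 1 ≤ x ∧ x ≤ 6) :
    ws.countP (fun x => decide (x ≤ 0)) = 0 := by
  rw [List.countP_eq_zero]
  intro x hx
  have := h x hx
  simp; omega

-- the fold computes the frequency table and the count of recognised blooms
lemma fold_eq (blooms : List String) :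
    blooms.foldl bStep ([0,0,0,0,0,0,0], 0)
      = ([0, ((blooms.filterMap bloomWeight?).count 1 : Int),
             ((blooms.filterMap bloomWeight?).count 2 : Int),
             ((blooms.filterMap bloomWeight?).count 3 : Int),
             ((blooms.filterMap bloomWeight?).count 4 : Int),
             ((blooms.filterMap bloomWeight?).count 5 : Int),
             ((blooms.filterMap bloomWeight?).count 6 : Int)],
         ((blooms.filterMap bloomWeight?).length : Int)) := by
  induction blooms using List.reverseRecOn with
  | nil => simp
  | append_singleton l b ih =>
    rw [List.foldl_append, List.foldl_cons, List.foldl_nil, ih]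
    unfold bStep
    rcases h : bloomWeight? b with _ | w
    · simp [List.filterMap_append, h]
    · have hb := h
      unfold bloomWeight? at hb
      split_ifs at hb <;> (injection hb with hw; subst hw) <;>
        simp_all [List.filterMap_append, List.count_append, List.set, List.getD]

-- ===== VERDICT (by name: the statement is the Claim_ definition above) =====
theorem median_difficulty_py_spec : Claim_equal_median_difficulty_py := by
  intro blooms _dom
  unfold Spec_median_difficulty_py
  simp only [median_difficulty_py, median_difficulty_py_alt]
  rw [fold_eq]
  set ws := blooms.filterMap bloomWeight? with hwsdef
  by_cases hempty : ws = []
  · simp [hempty, PySem.List.sorted_eq_nil_iff]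
  · set s := PySem.List.sorted ws (fun x => x) false with hsdef
    have hsne : s ≠ [] := by simpa [hsdef, PySem.List.sorted_eq_nil_iff] using hempty
    have hperm : s.Perm ws := PySem.List.sorted_perm ws (fun x => x) false
    have hlen : s.length = ws.length := hperm.length_eq
    have hNpos : 0 < ws.length := List.length_pos_iff.2 hempty
    have hn0 : ¬ ((ws.length : Int) = 0) := by omega
    rw [if_neg hsne, if_neg hn0]
    set k : Nat := ws.length / 2 with hkdef
    have hhalf : PySem.Int.floordiv (ws.length : Int) 2 = (k : Int) := by
      exact_mod_cast PySem.Int.floordiv_natCast ws.length 2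
    have hk : k < s.length := by rw [hlen]; omega
    have hpw : s.Pairwise (· ≤ ·) := by simpa using PySem.List.sorted_pairwise ws (fun x => x)
    have hidx : s.length / 2 = k := by rw [hlen]
    rw [hidx, hhalf]
    set m : Int := s.getD k 0 with hmdef
    have hmmem : m ∈ ws := by
      have : m ∈ s := by
        rw [hmdef, List.getD_eq_getElem?_getD, List.getElem?_eq_getElem hk]
        exact List.getElem_mem hk
      exact hperm.mem_iff.mp this
    have hmr : 1 ≤ m ∧ m ≤ 6 := mem_ws_range (hwsdef ▸ hmmem)
    have key : ∀ w : Int, (m ≤ w ↔ k < ws.countP (fun x => decide (x ≤ w))) := by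
      intro w
      rw [hmdef, sorted_getD_le_iff s hpw k hk w, hperm.countP_eq]
    have h0 : ws.countP (fun x => decide (x ≤ 0)) = 0 :=
      countP_le_zero (fun x hx => mem_ws_range (hwsdef ▸ hx))
    have e1 : ws.countP (fun x => decide (x ≤ 1)) = ws.count 1 := by
      rw [countP_le_step]; norm_num [h0]
    have e2 : ws.countP (fun x => decide (x ≤ 2)) = ws.count 1 + ws.count 2 := by
      rw [countP_le_step]; norm_num [e1]
    have e3 : ws.countP (fun x => decide (x ≤ 3)) = ws.count 1 + ws.count 2 + ws.count 3 := by
      rw [countP_le_step]; norm_num [e2]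
    have e4 : ws.countP (fun x => decide (x ≤ 4)) = ws.count 1 + ws.count 2 + ws.count 3 + ws.count 4 := by
      rw [countP_le_step]; norm_num [e3]
    have e5 : ws.countP (fun x => decide (x ≤ 5)) = ws.count 1 + ws.count 2 + ws.count 3 + ws.count 4 + ws.count 5 := by
      rw [countP_le_step]; norm_num [e4]
    have k1 := key 1; have k2 := key 2; have k3 := key 3; have k4 := key 4; have k5 := key 5
    rw [e1] at k1; rw [e2] at k2; rw [e3] at k3; rw [e4] at k4; rw [e5] at k5
    have hpick : bPick [0, (ws.count 1 : Int), (ws.count 2 : Int), (ws.count 3 : Int),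
        (ws.count 4 : Int), (ws.count 5 : Int), (ws.count 6 : Int)] (k : Int) [1,2,3,4,5] 0 = m := by
      simp only [bPick, List.getD, List.getElem?_cons_zero, List.getElem?_cons_succ,
        Option.getD_some]
      by_cases b1 : ((0 : Int) + (ws.count 1 : Int) > (k : Int))
      · rw [if_pos b1]
        have h1 : m ≤ 1 := k1.mpr (by omega)
        omega
      · rw [if_neg b1]
        have h1 : ¬ m ≤ 1 := fun h => b1 (by have := k1.mp h; omega)
        by_cases b2 : ((0 : Int) + (ws.count 1 : Int) + (ws.count 2 : Int) > (k : Int))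
        · rw [if_pos b2]
          have h2 : m ≤ 2 := k2.mpr (by omega)
          omega
        · rw [if_neg b2]
          have h2 : ¬ m ≤ 2 := fun h => b2 (by have := k2.mp h; omega)
          by_cases b3 : ((0 : Int) + (ws.count 1 : Int) + (ws.count 2 : Int) + (ws.count 3 : Int) > (k : Int))
          · rw [if_pos b3]
            have h3 : m ≤ 3 := k3.mpr (by omega)
            omega
          · rw [if_neg b3]
            have h3 : ¬ m ≤ 3 := fun h => b3 (by have := k3.mp h; omega)
            by_cases b4 : ((0 : Int) + (ws.count 1 : Int) + (ws.count 2 : Int) + (ws.count 3 : Int) + (ws.count 4 : Int) > (k : Int))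
            · rw [if_pos b4]
              have h4 : m ≤ 4 := k4.mpr (by omega)
              omega
            · rw [if_neg b4]
              have h4 : ¬ m ≤ 4 := fun h => b4 (by have := k4.mp h; omega)
              by_cases b5 : ((0 : Int) + (ws.count 1 : Int) + (ws.count 2 : Int) + (ws.count 3 : Int) + (ws.count 4 : Int) + (ws.count 5 : Int) > (k : Int))
              · rw [if_pos b5]
                have h5 : m ≤ 5 := k5.mpr (by omega)
                omega
              · rw [if_neg b5]
                have h5 : ¬ m ≤ 5 := fun h => b5 (by have := k5.mp h; omega)
                omega
    rw [hpick]
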